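-- pv_equiv track=rewrite | github.com/lamendo/mentis-log | benchmarks/adapters/evaluation.py | merge_nearby_indices
-- ===== SOURCE A (Python) =====
-- from typing import Any, Dict, Iterable, List, Sequence, Tuple
--
-- def merge_nearby_indices(
--     indices: Iterable[int],
--     merge_window: int,
-- ) -> List[int]:
--     """Collapse indices that are within ``merge_window`` of each other
--     into the smallest one in the cluster. Deterministic."""
--     out: List[int] = []
--     for i in sorted(int(x) for x in indices):
--         if not out or i - out[-1] > merge_window:
--             out.append(i)
--     return out
-- ===== SOURCE B (Python) =====
-- def merge_nearby_indices(indices, merge_window):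
--     """Greedy repeated-minimum selection with neighbourhood clearing:
--     no sort; repeatedly pick the minimum, emit it, drop one occurrence of it,
--     then discard everything within merge_window of it."""
--     vals = [int(x) for x in indices]
--     out = []
--     while vals:
--         m = min(vals)
--         out.append(m)
--         vals.remove(m)
--         vals = [v for v in vals if v - m > merge_window]
--     return out
-- ===== Notes on version B (the rewrite author's own statement) =====
-- stated objective: alternative
-- what changed: Replaces sort-then-scan (keep each sorted element farther than merge_window from the last kept) by greedy repeated-minimum selection on the unsorted list: pick the minimum, remove one occurrence, filter out its neighbourhood, repeat.
import Mathlib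
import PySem

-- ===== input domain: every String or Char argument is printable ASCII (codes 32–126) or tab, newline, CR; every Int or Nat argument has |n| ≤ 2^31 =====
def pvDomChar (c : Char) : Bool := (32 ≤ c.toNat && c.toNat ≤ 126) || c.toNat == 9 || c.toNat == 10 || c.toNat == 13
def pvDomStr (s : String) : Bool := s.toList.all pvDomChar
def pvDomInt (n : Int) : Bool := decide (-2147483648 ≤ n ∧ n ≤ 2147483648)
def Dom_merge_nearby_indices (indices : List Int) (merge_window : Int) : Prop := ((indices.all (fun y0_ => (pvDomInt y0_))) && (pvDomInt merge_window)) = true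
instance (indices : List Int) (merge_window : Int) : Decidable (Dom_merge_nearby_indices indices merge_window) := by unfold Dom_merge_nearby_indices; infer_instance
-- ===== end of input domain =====

-- B replaces A's sort-then-scan by greedy repeated-minimum selection with neighbourhood
-- clearing (alternative decomposition; no speed claim).

-- ===== PORT A =====
-- for i in sorted(indices): if not out or i - out[-1] > merge_window: out.append(i)
def merge_nearby_indices (indices : List Int) (merge_window : Int) : List Int :=
  (PySem.List.sorted indices (fun x => x) false).foldl
    (fun out i =>
      if out.isEmpty then out ++ [i]
      else if i - PySem.List.pyGetD out (-1) 0 > merge_window then out ++ [i]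
      else out) []

-- ===== PORT B =====
-- while vals: m = min(vals); out.append(m); vals.remove(m); vals = [v for v in vals if v - m > merge_window]
-- vals.remove(m) is ported as vals.erase m: m = min(vals) is always present, so Python's
-- remove deletes the first occurrence and never raises (PySem.List.remove?_eq_some_erase).
def mniLoop (merge_window : Int) (vals : List Int) : List Int :=
  match h : PySem.List.min? vals (fun x => x) with
  | none => []
  | some m =>
      m :: mniLoop merge_window ((vals.erase m).filter (fun v => v - m > merge_window))
termination_by vals.length
decreasing_by
  have hm : m ∈ vals := PySem.List.min?_mem h
  calc ((vals.erase m).filter (fun v => v - m > merge_window)).length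
      ≤ (vals.erase m).length := List.length_filter_le _ _
    _ < vals.length := by
        rw [List.length_erase_of_mem hm]
        exact Nat.sub_lt (List.length_pos_of_mem hm) Nat.one_pos

def merge_nearby_indices_alt (indices : List Int) (merge_window : Int) : List Int :=
  mniLoop merge_window indices

-- ===== PRECONDITION & SPEC =====
def Spec_merge_nearby_indices (indices : List Int) (merge_window : Int) (out : List Int) : Prop := out = merge_nearby_indices_alt indices merge_window
instance (indices : List Int) (merge_window : Int) (out : List Int) : Decidable (Spec_merge_nearby_indices indices merge_window out) := by unfold Spec_merge_nearby_indices; infer_instance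

-- ===== CLAIM (what is proved, stated in full; the proofs are below) =====
def Claim_equal_merge_nearby_indices : Prop := ∀ (indices : List Int) (merge_window : Int), Dom_merge_nearby_indices indices merge_window → Spec_merge_nearby_indices indices merge_window (merge_nearby_indices indices merge_window)

-- ===== LEMMAS AND PROOFS =====


-- unfolding lemmas for mniLoop
theorem mniLoop_nil (w : Int) : mniLoop w [] = [] := by
  rw [mniLoop.eq_def]; rfl

theorem mniLoop_some (w : Int) (l : List Int) (m : Int)
    (h : PySem.List.min? l (fun x => x) = some m) :
    mniLoop w l = m :: mniLoop w ((l.erase m).filter (fun v => v - m > w)) := by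
  rw [mniLoop.eq_def]
  split
  · rename_i h'; rw [h] at h'; cases h'
  · rename_i m' h'; rw [h] at h'; cases h'; rfl

-- min?'s VALUE only depends on the multiset of the list
theorem min?_id_of_perm (l l' : List Int) (hp : l.Perm l') (m : Int)
    (h : PySem.List.min? l (fun x => x) = some m) :
    PySem.List.min? l' (fun x => x) = some m := by
  have hm : m ∈ l' := hp.mem_iff.mp (PySem.List.min?_mem h)
  cases h' : PySem.List.min? l' (fun x => x) with
  | none =>
      have : l' = [] := (PySem.List.min?_eq_none_iff l' _).mp h'
      subst this; exact absurd hm (List.not_mem_nil)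
  | some m' =>
      have h1 : (m : Int) ≤ m' := PySem.List.min?_isMin h m' (hp.mem_iff.mpr (PySem.List.min?_mem h'))
      have h2 : (m' : Int) ≤ m := PySem.List.min?_isMin h' m hm
      rw [le_antisymm h2 h1]

-- mniLoop only depends on the multiset of vals
theorem mniLoop_perm (w : Int) : ∀ (n : ℕ) (l l' : List Int), l.length ≤ n → l.Perm l' →
    mniLoop w l = mniLoop w l' := by
  intro n
  induction n with
  | zero =>
      intro l l' hn hp
      have : l = [] := List.length_eq_zero_iff.mp (Nat.le_zero.mp hn)
      subst this
      rw [List.Perm.eq_nil hp.symm]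
  | succ n ih =>
      intro l l' hn hp
      cases h : PySem.List.min? l (fun x => x) with
      | none =>
          have : l = [] := (PySem.List.min?_eq_none_iff l _).mp h
          subst this
          rw [List.Perm.eq_nil hp.symm]
      | some m =>
          rw [mniLoop_some w l m h, mniLoop_some w l' m (min?_id_of_perm l l' hp m h)]
          congr 1
          have hm : m ∈ l := PySem.List.min?_mem h
          refine ih _ _ ?_ ((hp.erase m).filter _)
          calc ((l.erase m).filter (fun v => v - m > w)).length
              ≤ (l.erase m).length := List.length_filter_le _ _
            _ ≤ n := by rw [List.length_erase_of_mem hm]; omega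

theorem foldl_min_of_le (t : List Int) : ∀ (x : Int), (∀ v ∈ t, x ≤ v) → t.foldl min x = x := by
  induction t with
  | nil => intro x _; rfl
  | cons y ys ih =>
      intro x h
      rw [List.foldl_cons, min_eq_left (h y (List.mem_cons_self))]
      exact ih x (fun v hv => h v (List.mem_cons_of_mem y hv))

theorem min?_head (x : Int) (xs : List Int) (h : ∀ v ∈ xs, x ≤ v) :
    PySem.List.min? (x :: xs) (fun y => y) = some x := by
  rw [PySem.List.min?_id_cons, foldl_min_of_le xs x h]

-- on a list whose head is minimal, B's loop emits the head and filters the tail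
theorem mniLoop_cons_min (w x : Int) (xs : List Int) (h : ∀ v ∈ xs, x ≤ v) :
    mniLoop w (x :: xs) = x :: mniLoop w (xs.filter (fun v => v - x > w)) := by
  rw [mniLoop_some w _ x (min?_head x xs h), List.erase_cons_head]

theorem filter_filter_window (w a x : Int) (ha : a ≤ x) (xs : List Int) :
    (xs.filter (fun v => decide (v - a > w))).filter (fun v => decide (v - x > w))
      = xs.filter (fun v => decide (v - x > w)) := by
  rw [List.filter_filter]
  exact List.filter_congr (fun v _ => by
    by_cases hvx : v - x > w
    · have hva : v - a > w := by omega
      simp [hvx, hva]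
    · simp [hvx])

-- what A's fold computes from a nonempty accumulator ending in a, over a sorted tail ≥ a
theorem foldlA (w : Int) : ∀ (l : List Int), l.Pairwise (· ≤ ·) →
    ∀ (out : List Int) (a : Int), out.getLast? = some a → (∀ v ∈ l, a ≤ v) →
    l.foldl (fun out i =>
      if out.isEmpty then out ++ [i]
      else if i - PySem.List.pyGetD out (-1) 0 > w then out ++ [i]
      else out) out
    = out ++ mniLoop w (l.filter (fun v => v - a > w)) := by
  intro l
  induction l with
  | nil =>
      intro _ out a _ _
      simp [mniLoop_nil]
  | cons x xs ih =>
      intro hl out a hlast hle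
      have hne : out ≠ [] := by intro h; subst h; cases hlast
      have hE : out.isEmpty = false := by simp [hne]
      have hgl : PySem.List.pyGetD out (-1) 0 = a := by
        rw [PySem.List.pyGetD_neg_one out 0 hne]
        rw [List.getLast?_eq_some_getLast hne] at hlast
        exact Option.some.inj hlast
      have hxxs : ∀ v ∈ xs, x ≤ v := (List.pairwise_cons.mp hl).1
      have hxs : xs.Pairwise (· ≤ ·) := (List.pairwise_cons.mp hl).2
      have hax : a ≤ x := hle x (List.mem_cons_self)
      rw [List.foldl_cons]
      by_cases hx : x - a > w
      · -- x is kept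
        have hstep : (if out.isEmpty then out ++ [x]
            else if x - PySem.List.pyGetD out (-1) 0 > w then out ++ [x] else out) = out ++ [x] := by
          rw [hE, hgl]; simp [hx]
        rw [hstep, ih hxs (out ++ [x]) x List.getLast?_concat hxxs]
        have hfc : (x :: xs).filter (fun v => decide (v - a > w))
            = x :: xs.filter (fun v => decide (v - a > w)) := by
          rw [List.filter_cons_of_pos (by simpa using hx)]
        rw [hfc, mniLoop_cons_min w x _ (fun v hv => hxxs v (List.mem_of_mem_filter hv)),
            filter_filter_window w a x hax xs]
        simp
      · -- x is skipped
        have hstep : (if out.isEmpty then out ++ [x]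
            else if x - PySem.List.pyGetD out (-1) 0 > w then out ++ [x] else out) = out := by
          rw [hE, hgl]; simp [hx]
        rw [hstep, ih hxs out a hlast (fun v hv => hle v (List.mem_cons_of_mem x hv))]
        rw [List.filter_cons_of_neg (by simpa using hx)]

-- on a sorted list, A's scan equals B's loop
theorem sorted_case (w : Int) (s : List Int) (hs : s.Pairwise (· ≤ ·)) :
    s.foldl (fun out i =>
      if out.isEmpty then out ++ [i]
      else if i - PySem.List.pyGetD out (-1) 0 > w then out ++ [i]
      else out) []
    = mniLoop w s := by
  cases s with
  | nil => rw [mniLoop_nil]; rfl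
  | cons x xs =>
      have hxxs : ∀ v ∈ xs, x ≤ v := (List.pairwise_cons.mp hs).1
      have hxs : xs.Pairwise (· ≤ ·) := (List.pairwise_cons.mp hs).2
      rw [List.foldl_cons]
      have hstep : (if ([] : List Int).isEmpty then ([] : List Int) ++ [x]
          else if x - PySem.List.pyGetD ([] : List Int) (-1) 0 > w then [] ++ [x] else []) = [x] := by
        simp
      rw [hstep, foldlA w xs hxs [x] x rfl hxxs, mniLoop_cons_min w x xs hxxs]
      simp

-- ===== VERDICT (by name: the statement is the Claim_ definition above) =====
theorem merge_nearby_indices_spec : Claim_equal_merge_nearby_indices := by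
  intro indices w _
  unfold Spec_merge_nearby_indices merge_nearby_indices merge_nearby_indices_alt
  have hs : (PySem.List.sorted indices (fun x => x) false).Pairwise (· ≤ ·) := by
    have := PySem.List.sorted_pairwise (xs := indices) (key := fun x => x)
    simpa using this
  have hp : (PySem.List.sorted indices (fun x => x) false).Perm indices :=
    PySem.List.sorted_perm indices (fun x => x) false
  rw [sorted_case w _ hs]
  exact (mniLoop_perm w indices.length indices _ le_rfl hp.symm).symm
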